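-- pv_equiv track=rewrite | github.com/CLocs/clocs-sandbox1 | algorithms_on_graphs/week2_graph_decomposition2/cs_curriculum/acyclicity.py | run_dfs
-- ===== SOURCE A (Python) =====
-- def run_dfs(adj):
--     # https://stackoverflow.com/questions/21669584/pre-and-post-numbers
--     all_vs = list(range(len(adj)))
--     visited = [0] * len(adj)
--     pre = [0] * len(adj)
--     post = [0] * len(adj)
--     i_post = 1
--
--     def dfs(v_e, i_e):
--         visited[v_e] = 1
--         i_e += 1
--         pre[v_e] = i_e
--         for v_next_e in adj[v_e]:
--             if not visited[v_next_e]: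
--                 i_e = dfs(v_next_e, i_e)
--         i_e += 1
--         post[v_e] = i_e
--         return i_e
--
--     for v in all_vs:
--         if not visited[v]:
--             i_post = dfs(v, i_post)
--
--     return post
-- ===== SOURCE B (Python) =====
-- def run_dfs(adj):
--     # Iterative DFS with an explicit stack of (vertex, phase) frames instead of recursion.
--     n = len(adj)
--     visited = [0] * n
--     pre = [0] * n
--     post = [0] * n
--     i_post = 1
--     ENTER, EXIT = 0, 1
--     for v in range(n):
--         if visited[v]:
--             continue
--         stack = [(v, ENTER)]
--         while stack:
--             node, phase = stack.pop()
--             if phase == EXIT: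
--                 i_post += 1
--                 post[node] = i_post
--                 continue
--             if visited[node]:
--                 continue
--             visited[node] = 1
--             i_post += 1
--             pre[node] = i_post
--             stack.append((node, EXIT))
--             for nb in reversed(adj[node]):
--                 stack.append((nb, ENTER))
--     return post
-- ===== Notes on version B (the rewrite author's own statement) =====
-- stated objective: alternative
-- what changed: Replaces A's recursive inner dfs (closure mutating shared visited/pre/post) by an iterative DFS over an explicit stack of (vertex, enter/exit) frames that reproduces the same pre/post counter sequence.
import Mathlib
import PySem

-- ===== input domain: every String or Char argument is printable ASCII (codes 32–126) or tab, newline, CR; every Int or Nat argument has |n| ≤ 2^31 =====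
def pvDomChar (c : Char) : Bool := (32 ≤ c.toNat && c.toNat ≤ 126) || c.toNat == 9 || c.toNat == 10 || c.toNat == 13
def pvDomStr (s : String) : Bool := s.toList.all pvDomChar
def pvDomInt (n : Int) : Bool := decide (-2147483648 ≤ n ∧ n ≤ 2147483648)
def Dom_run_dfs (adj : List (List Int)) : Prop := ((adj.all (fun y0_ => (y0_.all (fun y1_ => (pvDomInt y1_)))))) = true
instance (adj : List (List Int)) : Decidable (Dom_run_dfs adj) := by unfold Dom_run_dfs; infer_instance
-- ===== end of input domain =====

-- B replaces A's recursive inner dfs by an explicit-stack iterative DFS (enter/exit frames); return value only.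

-- Python list indexing shared by both ports: a possibly negative index wraps (xs[v] with -len ≤ v < 0).
def pidx (n : Nat) (v : Int) : Nat := (if v < 0 then v + (n : Int) else v).toNat
def getI (l : List Int) (v : Int) : Int := l.getD (pidx l.length v) 0
def setI (l : List Int) (v : Int) (x : Int) : List Int := l.set (pidx l.length v) x
def getAdj (adj : List (List Int)) (v : Int) : List Int := adj.getD (pidx adj.length v) []

structure DState where
  vis : List Int
  pre : List Int
  post : List Int
deriving Repr, DecidableEq

-- ===== PORT A =====
-- A's recursive dfs; the fuel parameter is only a totality guard (one unit per recursion level;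
-- each level marks one unvisited vertex, so fuel = number of vertices never runs out).
mutual
def dfsA (adj : List (List Int)) : Nat → Int → Int → DState → Int × DState
  | 0, _, i, st => (i, st)
  | f+1, v, i, st =>
      let st1 : DState := ⟨setI st.vis v 1, setI st.pre v (i+1), st.post⟩
      let r := dfsLA adj f (getAdj adj v) (i+1) st1
      (r.1 + 1, ⟨r.2.vis, r.2.pre, setI r.2.post v (r.1 + 1)⟩)
  termination_by f => (f, 0)

def dfsLA (adj : List (List Int)) (f : Nat) : List Int → Int → DState → Int × DState
  | [], i, st => (i, st)
  | c :: cs, i, st =>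
      if getI st.vis c = 0 then
        let r := dfsA adj f c i st
        dfsLA adj f cs r.1 r.2
      else dfsLA adj f cs i st
  termination_by cs => (f, cs.length + 1)
end

def run_dfs (adj : List (List Int)) : List Int :=
  ((List.range adj.length).foldl
    (fun (p : Int × DState) (v : Nat) =>
      if getI p.2.vis (v : Int) = 0 then dfsA adj adj.length (v : Int) p.1 p.2 else p)
    (1, ⟨List.replicate adj.length 0, List.replicate adj.length 0,
         List.replicate adj.length 0⟩)).2.post

-- ===== PORT B =====
-- termination lemma for the stack loop: marking an unvisited in-range vertex lowers the zero-count
theorem count_set_one_lt (l : List Int) (k : Nat) (hk : k < l.length) (h0 : l.getD k 0 = 0) :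
    (l.set k 1).count 0 < l.count 0 := by
  induction l generalizing k with
  | nil => simp at hk
  | cons a t ih =>
    cases k with
    | zero =>
      simp [List.getD] at h0
      simp [h0]
    | succ k =>
      simp at hk
      have := ih k hk (by simpa [List.getD] using h0)
      simp [List.count_cons]
      omega

-- frames: (vertex, phase) with phase false = enter, true = exit; list head = top of stack.
-- The in-range conjunct in the guard is only a totality guard; inside Pre_ it always holds.
def stackLoop (adj : List (List Int)) (stack : List (Int × Bool)) (i : Int) (st : DState) :
    Int × DState :=
  match stack with
  | [] => (i, st)
  | (v, true) :: rest =>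
      stackLoop adj rest (i+1) ⟨st.vis, st.pre, setI st.post v (i+1)⟩
  | (v, false) :: rest =>
      if h : pidx st.vis.length v < st.vis.length ∧ getI st.vis v = 0 then
        stackLoop adj ((getAdj adj v).map (fun c => (c, false)) ++ (v, true) :: rest)
          (i+1) ⟨setI st.vis v 1, setI st.pre v (i+1), st.post⟩
      else stackLoop adj rest i st
  termination_by (st.vis.count 0, stack.length)
  decreasing_by
  · exact Prod.Lex.right _ (Nat.lt_succ_self _)
  · exact Prod.Lex.left _ _ (by simpa [setI] using count_set_one_lt st.vis _ h.1 h.2)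
  · exact Prod.Lex.right _ (Nat.lt_succ_self _)

def run_dfs_alt (adj : List (List Int)) : List Int :=
  ((List.range adj.length).foldl
    (fun (p : Int × DState) (v : Nat) =>
      if getI p.2.vis (v : Int) = 0 then stackLoop adj [((v : Int), false)] p.1 p.2 else p)
    (1, ⟨List.replicate adj.length 0, List.replicate adj.length 0,
         List.replicate adj.length 0⟩)).2.post

-- ===== PRECONDITION & SPEC =====
-- Pre_ excludes exactly the inputs where A raises IndexError: a neighbour outside [-n, n).
def Pre_run_dfs (adj : List (List Int)) : Prop :=
  ∀ l ∈ adj, ∀ x ∈ l, -(adj.length : Int) ≤ x ∧ x < (adj.length : Int)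
instance (adj : List (List Int)) : Decidable (Pre_run_dfs adj) := by
  unfold Pre_run_dfs; infer_instance
def pvWitness_run_dfs : List (List Int) := [[1, -1], [0], []]

def Spec_run_dfs (adj : List (List Int)) (out : List Int) : Prop := out = run_dfs_alt adj
instance (adj : List (List Int)) (out : List Int) : Decidable (Spec_run_dfs adj out) := by
  unfold Spec_run_dfs; infer_instance

-- ===== CLAIM (what is proved, stated in full; the proofs are below) =====
def Claim_equal_run_dfs : Prop :=
  ∀ (adj : List (List Int)), Dom_run_dfs adj → Pre_run_dfs adj →
    Spec_run_dfs adj (run_dfs adj)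

-- ===== LEMMAS AND PROOFS =====

theorem pidx_lt {n : Nat} {c : Int} (h1 : -(n : Int) ≤ c) (h2 : c < (n : Int)) :
    pidx n c < n := by
  unfold pidx
  split <;> omega

theorem pidx_natCast (n : Nat) (v : Nat) : pidx n (v : Int) = v := by
  unfold pidx
  split <;> omega

theorem getAdj_bounds {adj : List (List Int)} (hadj : Pre_run_dfs adj) (v : Int)
    (hv : pidx adj.length v < adj.length) :
    ∀ c ∈ getAdj adj v, -(adj.length : Int) ≤ c ∧ c < (adj.length : Int) := by
  intro c hc
  have : getAdj adj v ∈ adj := by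
    unfold getAdj
    rw [List.getD_eq_getElem _ _ hv]
    exact List.getElem_mem hv
  exact hadj _ this c hc

theorem length_setI (l : List Int) (v : Int) (x : Int) : (setI l v x).length = l.length := by
  simp [setI]

theorem count_pos_of_getD {l : List Int} {k : Nat} (hk : k < l.length) (h0 : l.getD k 0 = 0) :
    0 < l.count 0 := by
  rw [List.getD_eq_getElem _ _ hk] at h0
  have : (0 : Int) ∈ l := h0 ▸ List.getElem_mem hk
  exact List.count_pos_iff.mpr this

theorem count_set_one_le (l : List Int) (k : Nat) : (l.set k 1).count 0 ≤ l.count 0 := by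
  induction l generalizing k with
  | nil => simp
  | cons a t ih =>
    cases k with
    | zero => simp [List.count_cons]
    | succ k =>
      simpa [List.count_cons] using ih k

theorem count_setI_le (l : List Int) (v : Int) : (setI l v 1).count 0 ≤ l.count 0 :=
  count_set_one_le l _

-- dfsA/dfsLA preserve the three lengths and never increase the zero-count of visited
theorem dfs_inv : ∀ f : Nat,
    (∀ adj v i st, ((dfsA adj f v i st).2.vis.length = st.vis.length ∧
        (dfsA adj f v i st).2.vis.count 0 ≤ st.vis.count 0)) ∧
    (∀ adj cs i st, ((dfsLA adj f cs i st).2.vis.length = st.vis.length ∧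
        (dfsLA adj f cs i st).2.vis.count 0 ≤ st.vis.count 0)) := by
  intro f
  induction f with
  | zero =>
    refine ⟨by intro adj v i st; simp [dfsA], ?_⟩
    intro adj cs i st
    induction cs generalizing i st with
    | nil => simp [dfsLA]
    | cons c cs ih =>
      simp only [dfsLA, dfsA]
      split
      · exact ih i st
      · exact ih i st
  | succ f IH =>
    have hA : ∀ adj v i st, ((dfsA adj (f+1) v i st).2.vis.length = st.vis.length ∧
        (dfsA adj (f+1) v i st).2.vis.count 0 ≤ st.vis.count 0) := by
      intro adj v i st
      have h := IH.2 adj (getAdj adj v) (i+1)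
        ⟨setI st.vis v 1, setI st.pre v (i+1), st.post⟩
      simp only [dfsA]
      refine ⟨?_, ?_⟩
      · simpa [length_setI] using h.1
      · exact le_trans (by simpa using h.2) (count_setI_le st.vis v)
    refine ⟨hA, ?_⟩
    intro adj cs i st
    induction cs generalizing i st with
    | nil => simp [dfsLA]
    | cons c cs ih =>
      simp only [dfsLA]
      split
      · have h1 := hA adj c i st
        have h2 := ih (dfsA adj (f+1) c i st).1 (dfsA adj (f+1) c i st).2
        exact ⟨h2.1.trans h1.1, h2.2.trans h1.2⟩
      · exact ih i st

theorem simlist (adj : List (List Int)) (f : Nat) (_hadj : Pre_run_dfs adj)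
    (simh : ∀ v i st rest, st.vis.length = adj.length →
      pidx st.vis.length v < st.vis.length → getI st.vis v = 0 → st.vis.count 0 ≤ f →
      stackLoop adj ((v, false) :: rest) i st =
        stackLoop adj rest (dfsA adj f v i st).1 (dfsA adj f v i st).2) :
    ∀ cs i st rest, (∀ c ∈ cs, -(adj.length : Int) ≤ c ∧ c < (adj.length : Int)) →
      st.vis.length = adj.length → st.vis.count 0 ≤ f →
      stackLoop adj (cs.map (fun c => (c, false)) ++ rest) i st =
        stackLoop adj rest (dfsLA adj f cs i st).1 (dfsLA adj f cs i st).2 := by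
  intro cs
  induction cs with
  | nil =>
    intro i st rest _ _ _
    simp [dfsLA]
  | cons c cs ih =>
    intro i st rest hb hlen hcount
    have hcb := hb c (List.mem_cons_self)
    have hlt : pidx st.vis.length c < st.vis.length := by
      rw [hlen]; exact pidx_lt hcb.1 hcb.2
    rw [List.map_cons, List.cons_append]
    by_cases h0 : getI st.vis c = 0
    · rw [simh c i st _ hlen hlt h0 hcount]
      have hinv := (dfs_inv f).1 adj c i st
      rw [ih _ _ _ (fun x hx => hb x (List.mem_cons_of_mem _ hx))
        (hinv.1.trans hlen) (hinv.2.trans hcount)]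
      simp only [dfsLA, if_pos h0]
    · have hng : ¬ (pidx st.vis.length c < st.vis.length ∧ getI st.vis c = 0) :=
        fun hc => h0 hc.2
      rw [stackLoop, dif_neg hng]
      rw [ih _ _ _ (fun x hx => hb x (List.mem_cons_of_mem _ hx)) hlen hcount]
      simp only [dfsLA, if_neg h0]

theorem sim : ∀ f : Nat, ∀ adj : List (List Int), Pre_run_dfs adj →
    ∀ v i st rest, st.vis.length = adj.length →
      pidx st.vis.length v < st.vis.length → getI st.vis v = 0 → st.vis.count 0 ≤ f →
      stackLoop adj ((v, false) :: rest) i st =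
        stackLoop adj rest (dfsA adj f v i st).1 (dfsA adj f v i st).2 := by
  intro f
  induction f with
  | zero =>
    intro adj _ v i st rest hlen hlt h0 hcount
    have := count_pos_of_getD hlt (by simpa [getI] using h0)
    omega
  | succ f IH =>
    intro adj hadj v i st rest hlen hlt h0 hcount
    rw [stackLoop, dif_pos ⟨hlt, h0⟩]
    have hb := getAdj_bounds hadj v (hlen ▸ hlt)
    have hcount' : (setI st.vis v 1).count 0 ≤ f := by
      have := count_set_one_lt st.vis _ hlt (by simpa [getI] using h0)
      simp only [setI] at this ⊢
      omega
    rw [simlist adj f hadj (IH adj hadj) (getAdj adj v) (i+1)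
      ⟨setI st.vis v 1, setI st.pre v (i+1), st.post⟩ ((v, true) :: rest) hb
      (by simp [length_setI, hlen]) hcount']
    rw [stackLoop]
    simp only [dfsA]

theorem outer (adj : List (List Int)) (hpre : Pre_run_dfs adj) :
    ∀ (vs : List Nat), (∀ v ∈ vs, v < adj.length) → ∀ (i : Int) (st : DState),
      st.vis.length = adj.length →
      List.foldl (fun (p : Int × DState) (v : Nat) =>
          if getI p.2.vis (v : Int) = 0 then stackLoop adj [((v : Int), false)] p.1 p.2 else p)
        (i, st) vs
      = List.foldl (fun (p : Int × DState) (v : Nat) =>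
          if getI p.2.vis (v : Int) = 0 then dfsA adj adj.length (v : Int) p.1 p.2 else p)
        (i, st) vs := by
  intro vs
  induction vs with
  | nil => intro _ i st _; rfl
  | cons v vs ih =>
    intro hv i st hlen
    simp only [List.foldl_cons]
    by_cases h0 : getI st.vis (v : Int) = 0
    · rw [if_pos h0, if_pos h0]
      have hlt : pidx st.vis.length (v : Int) < st.vis.length := by
        rw [pidx_natCast, hlen]; exact hv v List.mem_cons_self
      have hc : st.vis.count 0 ≤ adj.length :=
        le_trans (List.count_le_length) (le_of_eq hlen)
      have hs := sim adj.length adj hpre (v : Int) i st [] hlen hlt h0 hc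
      rw [stackLoop] at hs
      rw [hs]
      have hinv := (dfs_inv adj.length).1 adj (v : Int) i st
      rw [ih (fun x hx => hv x (List.mem_cons_of_mem _ hx)) _ _ (hinv.1.trans hlen)]
    · rw [if_neg h0, if_neg h0]
      exact ih (fun x hx => hv x (List.mem_cons_of_mem _ hx)) i st hlen

-- ===== VERDICT (by name: the statement is the Claim_ definition above) =====
theorem run_dfs_spec : Claim_equal_run_dfs := by
  intro adj _ hpre
  unfold Spec_run_dfs run_dfs run_dfs_alt
  rw [outer adj hpre (List.range adj.length) (fun v hv => List.mem_range.mp hv) 1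
    ⟨List.replicate adj.length 0, List.replicate adj.length 0, List.replicate adj.length 0⟩
    (by simp)]
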